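-- pv_equiv track=rewrite | github.com/Lajanz/insectiod_propulsion_system_graphs | testing.py | gen_categories
-- ===== SOURCE A (Python) =====
-- def gen_categories(wings, springs):
--     # Categories
--
--     x = []
--     # x = list(range((len(wings)))) * len(springs)
--     for i in range(len(wings)):
--         x.extend([i] * len(springs))
--
--     y = []
--     for i in range(len(wings)):
--         y.extend([i] * len(springs))
--
--     y = list(range((len(springs)))) * len(wings)
--     return x, y
-- ===== SOURCE B (Python) =====
-- def gen_categories(wings, springs):
--     # One interleaved nested pass: emit one (i, j) index pair per grid cell.
--     x, y = [], []
--     for i in range(len(wings)):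
--         for j in range(len(springs)):
--             x.append(i)
--             y.append(j)
--     return x, y
-- ===== Notes on version B (the rewrite author's own statement) =====
-- stated objective: simpler
-- what changed: Replaces A's block-extend loop for x, a dead loop for y, and a list-repetition rebuild of y with a single nested loop that appends one (i, j) pair per grid cell.
import Mathlib
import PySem

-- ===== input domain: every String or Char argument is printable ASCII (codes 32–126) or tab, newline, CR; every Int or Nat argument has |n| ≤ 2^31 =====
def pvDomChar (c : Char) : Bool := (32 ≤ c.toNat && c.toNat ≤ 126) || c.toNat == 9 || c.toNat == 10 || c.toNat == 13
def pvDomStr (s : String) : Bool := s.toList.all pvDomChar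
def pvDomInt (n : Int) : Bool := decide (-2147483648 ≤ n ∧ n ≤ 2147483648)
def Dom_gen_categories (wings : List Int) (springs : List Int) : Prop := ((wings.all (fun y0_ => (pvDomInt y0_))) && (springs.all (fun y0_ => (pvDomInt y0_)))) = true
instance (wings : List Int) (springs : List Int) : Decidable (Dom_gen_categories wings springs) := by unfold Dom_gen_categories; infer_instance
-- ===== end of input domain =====

-- B builds x and y in one interleaved nested loop (one (i,j) pair per grid cell) instead of A's
-- block-extend loop for x, dead loop for y, and list-repetition rebuild of y; objective: simpler.

-- ===== PORT A =====
def gen_categories (wings : List Int) (springs : List Int) : List Int × List Int :=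
  -- x = []; for i in range(len(wings)): x.extend([i] * len(springs))
  let x := (List.range wings.length).foldl
    (fun acc i => acc ++ List.replicate springs.length (Int.ofNat i)) []
  -- y = []; for i in range(len(wings)): y.extend([i] * len(springs))   (dead: overwritten below)
  let _y := (List.range wings.length).foldl
    (fun acc i => acc ++ List.replicate springs.length (Int.ofNat i)) []
  -- y = list(range(len(springs))) * len(wings)
  let y := PySem.List.pyRepeat ((List.range springs.length).map Int.ofNat) (wings.length : Int)
  (x, y)

-- ===== PORT B =====
def gen_categories_alt (wings : List Int) (springs : List Int) : List Int × List Int :=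
  (List.range wings.length).foldl
    (fun (st : List Int × List Int) i =>
      (List.range springs.length).foldl
        (fun st2 j => (st2.1 ++ [Int.ofNat i], st2.2 ++ [Int.ofNat j])) st)
    ([], [])

-- ===== PRECONDITION & SPEC =====
def Spec_gen_categories (wings : List Int) (springs : List Int) (out : List Int × List Int) : Prop := out = gen_categories_alt wings springs
instance (wings : List Int) (springs : List Int) (out : List Int × List Int) : Decidable (Spec_gen_categories wings springs out) := by unfold Spec_gen_categories; infer_instance

-- ===== CLAIM (what is proved, stated in full; the proofs are below) =====
def Claim_equal_gen_categories : Prop := ∀ (wings : List Int) (springs : List Int), Dom_gen_categories wings springs → Spec_gen_categories wings springs (gen_categories wings springs)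

-- ===== LEMMAS AND PROOFS =====

-- B's inner loop over range S appends the block [i]*S to x and range(S) to y.
lemma inner_loop (S : Nat) (i : Int) (x y : List Int) :
    (List.range S).foldl (fun st2 j => (st2.1 ++ [i], st2.2 ++ [Int.ofNat j])) (x, y)
      = (x ++ List.replicate S i, y ++ (List.range S).map Int.ofNat) := by
  induction S generalizing x y with
  | zero => simp
  | succ n ih =>
    rw [List.range_succ, List.foldl_append]
    rw [ih]
    simp [List.replicate_succ']

-- B's outer loop accumulates A's x-blocks and repeats range(S) once per i.
lemma outer_loop (S : Nat) (n : Nat) (x y : List Int) :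
    (List.range n).foldl
      (fun (st : List Int × List Int) i =>
        (List.range S).foldl
          (fun st2 j => (st2.1 ++ [Int.ofNat i], st2.2 ++ [Int.ofNat j])) st) (x, y)
      = (x ++ (List.range n).foldl (fun acc i => acc ++ List.replicate S (Int.ofNat i)) [],
         y ++ (List.replicate n ((List.range S).map Int.ofNat)).flatten) := by
  induction n generalizing x y with
  | zero => simp
  | succ m ih =>
    rw [List.range_succ, List.foldl_append, List.foldl_append]
    simp only [List.foldl_cons, List.foldl_nil]
    rw [ih, inner_loop]
    simp [List.replicate_succ']

lemma pyRepeat_eq_flatten_replicate (l : List Int) (n : Nat) :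
    PySem.List.pyRepeat l (n : Int) = (List.replicate n l).flatten := by
  induction n with
  | zero => simp [PySem.List.pyRepeat]
  | succ m ih => simp [PySem.List.pyRepeat]

-- ===== VERDICT (by name: the statement is the Claim_ definition above) =====
theorem gen_categories_spec : Claim_equal_gen_categories := by
  intro wings springs _
  unfold Spec_gen_categories gen_categories gen_categories_alt
  rw [pyRepeat_eq_flatten_replicate, outer_loop]
  simp
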